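-- pv_equiv track=rewrite | github.com/Ticktakto/Practice_Algorithm | Implementation/pro_catch_Doll.py | solution
-- ===== SOURCE A (Python) =====
-- def solution(board, moves):
--     leng = len(board)
--     moves = [(i - 1) for i in moves]
--
--     board_stack = [[] for _ in range(leng)]
--
--     # get last index each stack
--     for i in range(leng):
--
--         for j in range(leng-1,-1,-1):
--             if board[j][i] != 0:
--                 board_stack[i].append(board[j][i])
--     res_stack = []
--     answer = 0
--     for move in moves:
--         if len(board_stack[move]) == 0:
--             continue
--         get_sticker = board_stack[move].pop()
--         res_stack.append(get_sticker)
--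
--         if len(res_stack) > 1:
--             if get_sticker == res_stack[-2]:
--                 res_stack.pop()
--                 res_stack.pop()
--                 answer += 2
--
--     return answer
-- ===== SOURCE B (Python) =====
-- def solution(board, moves):
--     # One-pass: no precomputed column stacks; a per-column top pointer advances
--     # down the (unmutated) board on demand, and cancellation checks before pushing.
--     n = len(board)
--     tops = [0] * n
--     res = []
--     answer = 0
--     for m in moves:
--         c = m - 1
--         r = tops[c]
--         while r < n and board[r][c] == 0:
--             r += 1
--         tops[c] = r
--         if r == n:
--             continue
--         d = board[r][c]
--         tops[c] = r + 1
--         if res and res[-1] == d: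
--             res.pop()
--             answer += 2
--         else:
--             res.append(d)
--     return answer
-- ===== Notes on version B (the rewrite author's own statement) =====
-- stated objective: simpler
-- what changed: B drops A's precomputed per-column stacks: a per-column top pointer scans the unmutated board downward on demand for each move, and the result stack is checked before pushing instead of A's push-then-double-pop.
-- outside the precondition, e.g. on solution([[5, 2, 5], [3, 4, 5]], [0, 0]): A returns 0, B returns 2
import Mathlib
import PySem

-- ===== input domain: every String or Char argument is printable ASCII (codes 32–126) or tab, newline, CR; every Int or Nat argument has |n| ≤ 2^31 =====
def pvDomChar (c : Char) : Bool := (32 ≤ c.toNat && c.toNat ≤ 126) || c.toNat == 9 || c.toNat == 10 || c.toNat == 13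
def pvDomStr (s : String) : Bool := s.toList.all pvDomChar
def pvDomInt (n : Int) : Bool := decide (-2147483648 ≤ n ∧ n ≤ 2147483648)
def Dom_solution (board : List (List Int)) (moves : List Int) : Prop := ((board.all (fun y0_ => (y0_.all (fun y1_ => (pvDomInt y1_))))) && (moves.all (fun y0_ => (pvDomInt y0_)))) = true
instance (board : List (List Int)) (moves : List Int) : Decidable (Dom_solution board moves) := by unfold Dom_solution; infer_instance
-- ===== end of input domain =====

-- B replaces A's precomputed per-column stacks by per-column top pointers that scan the
-- unmutated board on demand (A does not mutate its arguments either; return values only).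

-- effIdx n i: the list cell Python's xs[i] touches — exact for in-range indices -n ≤ i < n
-- (out-of-range indices raise in Python and are excluded by Pre_solution).
def effIdx (n : Nat) (i : Int) : Nat := (if i < 0 then i + n else i).toNat

-- hand-ported Python list item assignment xs[i] = v; exact for in-range indices (see effIdx)
def pySetIdx {α : Type} (xs : List α) (i : Int) (v : α) : List α := xs.set (effIdx xs.length i) v

-- ===== PORT A =====
-- loop body of A's 'for move in moves'
def stepA (st : List (List Int) × List Int × Int) (move : Int) : List (List Int) × List Int × Int :=
  let bs := st.1
  let res := st.2.1
  let ans := st.2.2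
  let col := PySem.List.pyGetD bs move []
  if col.length = 0 then st
  else
    let g := PySem.List.pyGetD col (-1) 0      -- get_sticker = board_stack[move].pop() (read)
    let bs' := pySetIdx bs move col.dropLast   -- the pop's removal on the aliased column
    let res1 := res ++ [g]
    if 1 < res1.length then
      if g = PySem.List.pyGetD res1 (-2) 0 then (bs', res1.dropLast.dropLast, ans + 2)
      else (bs', res1, ans)
    else (bs', res1, ans)

def solution (board : List (List Int)) (moves : List Int) : Int :=
  let leng := board.length
  let moves' := moves.map (fun i => i - 1)
  let board_stack := (List.range leng).map (fun (i : Nat) =>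
    (PySem.List.pyRange ((leng : Int) - 1) (-1) (-1)).foldl
      (fun st j =>
        if PySem.List.pyGetD (PySem.List.pyGetD board j []) (i : Int) 0 ≠ 0
        then st ++ [PySem.List.pyGetD (PySem.List.pyGetD board j []) (i : Int) 0]
        else st) [])
  ((moves'.foldl stepA (board_stack, ([] : List Int), (0 : Int))).2.2)

-- ===== PORT B =====
-- 'while r < n and board[r][c] == 0: r += 1'
def scanB (board : List (List Int)) (n : Nat) (c : Int) (r : Int) : Int :=
  if _h : r < (n : Int) then
    if PySem.List.pyGetD (PySem.List.pyGetD board r []) c 0 = 0 then scanB board n c (r + 1) else r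
  else r
termination_by ((n : Int) - r).toNat
decreasing_by simp_wf; omega

-- loop body of B's 'for m in moves'
def stepB (board : List (List Int)) (n : Nat) (st : List Int × List Int × Int) (m : Int) :
    List Int × List Int × Int :=
  let tops := st.1
  let res := st.2.1
  let ans := st.2.2
  let c := m - 1
  let r := scanB board n c (PySem.List.pyGetD tops c 0)
  if r = (n : Int) then (pySetIdx tops c r, res, ans)
  else
    let d := PySem.List.pyGetD (PySem.List.pyGetD board r []) c 0
    let tops' := pySetIdx tops c (r + 1)
    if res ≠ [] ∧ res.getLast? = some d then (tops', res.dropLast, ans + 2)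
    else (tops', res ++ [d], ans)

def solution_alt (board : List (List Int)) (moves : List Int) : Int :=
  ((moves.foldl (stepB board board.length)
      (List.replicate board.length (0 : Int), ([] : List Int), (0 : Int))).2.2)

-- ===== PRECONDITION & SPEC =====
-- Pre_ excludes inputs where A raises (a row shorter than the board height, or a move whose
-- index falls outside Python's wrap range) and, among inputs A returns on, non-square boards
-- combined with non-positive moves: there Python's negative-index wraparound picks column
-- n+c in A's precomputed stacks but column len(row)+c in B's direct row indexing — an
-- accident of A's intermediate representation on boards the game never produces.
def Pre_solution (board : List (List Int)) (moves : List Int) : Prop :=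
  (∀ row ∈ board, board.length ≤ row.length) ∧
  (∀ m ∈ moves, -(board.length : Int) ≤ m - 1 ∧ m - 1 < (board.length : Int)) ∧
  ((∀ m ∈ moves, 1 ≤ m) ∨ (∀ row ∈ board, row.length = board.length))
instance (board : List (List Int)) (moves : List Int) : Decidable (Pre_solution board moves) := by
  unfold Pre_solution; infer_instance

def pvWitness_solution : List (List Int) × List Int := ([[0, 3], [1, 3]], [2, 2, 1])

def Spec_solution (board : List (List Int)) (moves : List Int) (out : Int) : Prop :=
  out = solution_alt board moves
instance (board : List (List Int)) (moves : List Int) (out : Int) :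
    Decidable (Spec_solution board moves out) := by unfold Spec_solution; infer_instance

-- ===== CLAIM (what is proved, stated in full; the proofs are below) =====
def Claim_equal_solution : Prop := ∀ (board : List (List Int)) (moves : List Int),
  Dom_solution board moves → Pre_solution board moves →
  Spec_solution board moves (solution board moves)

-- ===== LEMMAS AND PROOFS =====

-- the cell A's stack construction reads at column c, row r
def cellA (board : List (List Int)) (c r : Nat) : Int := (board.getD r []).getD c 0

-- the nonzero cells of column c from row r downwards, top first
def nzI (board : List (List Int)) (n c : Nat) (r : Int) : List Int :=
  if _h : r < (n : Int) then
    (if cellA board c r.toNat = 0 then nzI board n c (r + 1)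
     else cellA board c r.toNat :: nzI board n c (r + 1))
  else []
termination_by ((n : Int) - r).toNat
decreasing_by all_goals (simp_wf; omega)

-- the nonzero cells of column c among rows [0, k), top first
def nzBelow (board : List (List Int)) (c : Nat) : Nat → List Int
  | 0 => []
  | k + 1 => nzBelow board c k ++ (if cellA board c k = 0 then [] else [cellA board c k])

lemma effIdx_lt {n : Nat} {i : Int} (h1 : -(n : Int) ≤ i) (h2 : i < n) : effIdx n i < n := by
  unfold effIdx; split <;> omega

lemma pyGetD_effIdx {α : Type} (xs : List α) (i : Int) (d : α)
    (h1 : -(xs.length : Int) ≤ i) (h2 : i < xs.length) :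
    PySem.List.pyGetD xs i d = xs.getD (effIdx xs.length i) d := by
  by_cases h0 : 0 ≤ i
  · rw [PySem.List.pyGetD_eq_getElem xs d h0 (by simpa using h2)]
    rw [List.getD_eq_getElem xs d (by simp [effIdx, Int.not_lt.mpr h0]; omega)]
    congr 1
    simp [effIdx, Int.not_lt.mpr h0]
  · have h0 : i < 0 := by omega
    have hk : i = -(((-i).toNat : Nat) : Int) := by omega
    rw [hk, PySem.List.pyGetD_neg_natCast xs ((-i).toNat) d (by omega) (by omega), ← hk]
    rw [List.getD_eq_getElem xs d (show effIdx xs.length i < xs.length from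
      effIdx_lt (by omega) (by omega))]
    congr 1
    simp [effIdx, h0]
    omega

lemma pySetIdx_length {α : Type} (xs : List α) (i : Int) (v : α) :
    (pySetIdx xs i v).length = xs.length := by
  simp [pySetIdx]

lemma pySetIdx_getD {α : Type} (xs : List α) (i : Int) (v : α) (c : Nat) (d : α)
    (hc : c < xs.length) :
    (pySetIdx xs i v).getD c d = if c = effIdx xs.length i then v else xs.getD c d := by
  unfold pySetIdx
  rw [List.getD_eq_getElem _ d (by simpa using hc), List.getElem_set]
  split
  · simp_all
  · rw [List.getD_eq_getElem xs d hc]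
    simp_all [eq_comm]

lemma nzI_stop (board : List (List Int)) (n c : Nat) (r : Int) (h : (n : Int) ≤ r) :
    nzI board n c r = [] := by
  rw [nzI]; simp [Int.not_lt.mpr h]

lemma cell_eq (board : List (List Int)) (n : Nat) (cI : Int) (hn : board.length = n)
    (hb1 : -(n : Int) ≤ cI) (hb2 : cI < n)
    (hsq : 0 ≤ cI ∨ ∀ row ∈ board, row.length = n) (r : Nat) (hr : r < n) :
    PySem.List.pyGetD (PySem.List.pyGetD board (r : Int) []) cI 0 = cellA board (effIdx n cI) r := by
  rw [PySem.List.pyGetD_natCast board r []]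
  by_cases h0 : 0 ≤ cI
  · have hcast : cI = ((cI.toNat : Nat) : Int) := by omega
    rw [hcast, PySem.List.pyGetD_natCast]
    have heff : effIdx n ((cI.toNat : Nat) : Int) = cI.toNat := by
      unfold effIdx; rw [if_neg (by omega)]; exact Int.toNat_natCast _
    rw [heff]; rfl
  · have hsq' : ∀ row ∈ board, row.length = n := by
      rcases hsq with h | h
      · exact absurd h h0
      · exact h
    have hr' : r < board.length := by omega
    have hlen : (board.getD r []).length = n := by
      rw [List.getD_eq_getElem board [] hr']
      exact hsq' _ (List.getElem_mem hr')
    rw [pyGetD_effIdx (board.getD r []) cI 0 (by rw [hlen]; exact hb1) (by rw [hlen]; exact hb2)]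
    unfold cellA
    rw [hlen]

lemma scan_spec (board : List (List Int)) (n : Nat) (cI : Int)
    (hc : ∀ r : Nat, r < n →
      PySem.List.pyGetD (PySem.List.pyGetD board (r : Int) []) cI 0 = cellA board (effIdx n cI) r) :
    ∀ (k : Nat) (r : Int), ((n : Int) - r).toNat ≤ k → 0 ≤ r → r ≤ (n : Int) →
      r ≤ scanB board n cI r ∧ scanB board n cI r ≤ (n : Int) ∧
      nzI board n (effIdx n cI) r = nzI board n (effIdx n cI) (scanB board n cI r) ∧
      (scanB board n cI r < (n : Int) → nzI board n (effIdx n cI) (scanB board n cI r) =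
        PySem.List.pyGetD (PySem.List.pyGetD board (scanB board n cI r) []) cI 0
          :: nzI board n (effIdx n cI) (scanB board n cI r + 1)) := by
  intro k
  induction k with
  | zero =>
    intro r hf h0 hn'
    have hnr : ¬ r < (n : Int) := by omega
    rw [scanB]
    simp only [dif_neg hnr]
    exact ⟨le_refl _, hn', by trivial, fun h => absurd h hnr⟩
  | succ k ih =>
    intro r hf h0 hn'
    by_cases hr : r < (n : Int)
    · have hcell : PySem.List.pyGetD (PySem.List.pyGetD board r []) cI 0
          = cellA board (effIdx n cI) r.toNat := by
        have := hc r.toNat (by omega)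
        rwa [show ((r.toNat : Nat) : Int) = r by omega] at this
      rw [scanB]
      simp only [dif_pos hr]
      by_cases hz : PySem.List.pyGetD (PySem.List.pyGetD board r []) cI 0 = 0
      · rw [if_pos hz]
        obtain ⟨i1, i2, i3, i4⟩ := ih (r + 1) (by omega) (by omega) (by omega)
        refine ⟨by omega, i2, ?_, i4⟩
        rw [← i3, nzI, dif_pos hr, if_pos (by rw [← hcell]; exact hz)]
      · rw [if_neg hz]
        refine ⟨le_refl _, by omega, rfl, fun _ => ?_⟩
        rw [nzI, dif_pos hr, if_neg (by rw [← hcell] at *; exact hz), hcell]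
    · rw [scanB]
      simp only [dif_neg hr]
      exact ⟨le_refl _, by omega, by trivial, fun h => absurd h hr⟩

lemma build_aux (board : List (List Int)) (c : Nat) :
    ∀ (k : Nat) (acc : List Int),
      (PySem.List.pyRange ((k : Int) - 1) (-1) (-1)).foldl
        (fun st j =>
          if PySem.List.pyGetD (PySem.List.pyGetD board j []) (c : Int) 0 ≠ 0
          then st ++ [PySem.List.pyGetD (PySem.List.pyGetD board j []) (c : Int) 0]
          else st) acc = acc ++ (nzBelow board c k).reverse := by
  intro k
  induction k with
  | zero =>
    intro acc
    rw [PySem.List.pyRange_neg_one_eq_nil (by norm_num)]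
    simp [nzBelow]
  | succ k ih =>
    intro acc
    have hcast : ((k + 1 : Nat) : Int) - 1 = (k : Nat) := by push_cast; ring
    rw [hcast, PySem.List.pyRange_neg_one_cons (by omega)]
    simp only [List.foldl_cons]
    have hcell : PySem.List.pyGetD (PySem.List.pyGetD board ((k : Nat) : Int) []) ((c : Nat) : Int) 0
        = cellA board c k := by
      rw [PySem.List.pyGetD_natCast, PySem.List.pyGetD_natCast]; rfl
    rw [ih]
    simp only [hcell]
    by_cases hz : cellA board c k = 0
    · simp [nzBelow, hz]
    · simp [nzBelow, hz, List.append_assoc]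

lemma nzBelow_eq (board : List (List Int)) (n c : Nat) :
    ∀ k : Nat, k ≤ n → nzBelow board c k ++ nzI board n c (k : Int) = nzI board n c 0 := by
  intro k
  induction k with
  | zero => intro _; simp [nzBelow]
  | succ k ih =>
    intro hk
    have hlt : ((k : Nat) : Int) < (n : Int) := by omega
    have hstep : nzI board n c ((k : Nat) : Int)
        = (if cellA board c k = 0 then [] else [cellA board c k]) ++ nzI board n c (((k : Nat) : Int) + 1) := by
      rw [nzI, dif_pos hlt]
      simp only [Int.toNat_natCast]
      by_cases hz : cellA board c k = 0 <;> simp [hz]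
    have hcast : (((k + 1 : Nat)) : Int) = ((k : Nat) : Int) + 1 := by push_cast; ring
    rw [← ih (by omega), hcast]
    rw [hstep]
    simp [nzBelow, List.append_assoc]

-- the relation the move loop preserves between A's state and B's state
def InvP (board : List (List Int)) (n : Nat)
    (stA : List (List Int) × List Int × Int) (stB : List Int × List Int × Int) : Prop :=
  stA.1.length = n ∧ stB.1.length = n ∧ stA.2.1 = stB.2.1 ∧ stA.2.2 = stB.2.2 ∧
  ∀ c : Nat, c < n →
    0 ≤ stB.1.getD c 0 ∧ stB.1.getD c 0 ≤ (n : Int) ∧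
    stA.1.getD c [] = (nzI board n c (stB.1.getD c 0)).reverse

lemma res_step (res : List Int) (ans : Int) (d : Int) :
    (if 1 < (res ++ [d]).length then
       (if d = PySem.List.pyGetD (res ++ [d]) (-2) 0
        then ((res ++ [d]).dropLast.dropLast, ans + 2) else (res ++ [d], ans))
     else (res ++ [d], ans))
    = (if res ≠ [] ∧ res.getLast? = some d then (res.dropLast, ans + 2) else (res ++ [d], ans)) := by
  rcases List.eq_nil_or_concat res with h | ⟨ys, y, h⟩
  · subst h; simp
  · subst h
    simp only [List.concat_eq_append]
    have hm2 : PySem.List.pyGetD ((ys ++ [y]) ++ [d]) (-2) 0 = y := by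
      rw [PySem.List.pyGetD_neg_ofNat _ 2 0 (by omega) (by simp)]
      simp
    rw [if_pos (by simp), hm2]
    have hlast : (ys ++ [y]).getLast? = some y := by simp
    rw [hlast, List.dropLast_concat]
    by_cases hd : d = y
    · subst hd
      rw [if_pos rfl, if_pos ⟨by simp, rfl⟩, List.dropLast_concat]
    · rw [if_neg hd, if_neg (fun hcon => hd (Option.some.inj hcon.2).symm)]

lemma stepA_eq (st : List (List Int) × List Int × Int) (move : Int) :
    stepA st move =
      if PySem.List.pyGetD st.1 move [] = [] then st
      else
        (pySetIdx st.1 move (PySem.List.pyGetD st.1 move []).dropLast,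
         if st.2.1 ≠ [] ∧ st.2.1.getLast? = some (PySem.List.pyGetD (PySem.List.pyGetD st.1 move []) (-1) 0)
         then (st.2.1.dropLast, st.2.2 + 2)
         else (st.2.1 ++ [PySem.List.pyGetD (PySem.List.pyGetD st.1 move []) (-1) 0], st.2.2)) := by
  simp only [stepA]
  by_cases hnil : PySem.List.pyGetD st.1 move [] = []
  · simp [hnil]
  · rw [if_neg (by simpa [List.length_eq_zero_iff] using hnil), if_neg hnil]
    rw [← res_step st.2.1 st.2.2 (PySem.List.pyGetD (PySem.List.pyGetD st.1 move []) (-1) 0)]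
    split_ifs <;> rfl

lemma step_inv (board : List (List Int)) (n : Nat) (hn : board.length = n)
    (m : Int) (h1 : -(n : Int) ≤ m - 1) (h2 : m - 1 < (n : Int))
    (h3 : 1 ≤ m ∨ ∀ row ∈ board, row.length = n)
    (stA : List (List Int) × List Int × Int) (stB : List Int × List Int × Int)
    (hinv : InvP board n stA stB) :
    InvP board n (stepA stA (m - 1)) (stepB board n stB m) := by
  obtain ⟨hA, hB, hres, hans, hcols⟩ := hinv
  have hn0 : 0 < n := by omega
  have hclt : effIdx n (m - 1) < n := effIdx_lt h1 h2
  have hc : ∀ r : Nat, r < n → PySem.List.pyGetD (PySem.List.pyGetD board (r : Int) []) (m - 1) 0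
      = cellA board (effIdx n (m - 1)) r :=
    fun r hr => cell_eq board n (m - 1) hn h1 h2 (h3.imp (fun h => by omega) id) r hr
  obtain ⟨ht0, htn, hcol⟩ := hcols (effIdx n (m - 1)) hclt
  obtain ⟨hs1, hs2, hs3, hs4⟩ :=
    scan_spec board n (m - 1) hc ((n : Int) - stB.1.getD (effIdx n (m - 1)) 0).toNat
      (stB.1.getD (effIdx n (m - 1)) 0) (le_refl _) ht0 htn
  have hreadB : PySem.List.pyGetD stB.1 (m - 1) 0 = stB.1.getD (effIdx n (m - 1)) 0 := by
    rw [pyGetD_effIdx stB.1 (m - 1) 0 (by rw [hB]; exact h1) (by rw [hB]; exact h2), hB]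
  have hreadA : PySem.List.pyGetD stA.1 (m - 1) []
      = (nzI board n (effIdx n (m - 1)) (stB.1.getD (effIdx n (m - 1)) 0)).reverse := by
    rw [pyGetD_effIdx stA.1 (m - 1) [] (by rw [hA]; exact h1) (by rw [hA]; exact h2), hA]
    exact hcol
  rw [stepA_eq, hreadA]
  simp only [stepB, hreadB]
  rcases hnz : nzI board n (effIdx n (m - 1)) (stB.1.getD (effIdx n (m - 1)) 0) with _ | ⟨d, tail⟩
  · -- empty column: A skips, B records the exhausted pointer
    have hr'n : scanB board n (m - 1) (stB.1.getD (effIdx n (m - 1)) 0) = (n : Int) := by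
      by_contra hne
      have hlt : scanB board n (m - 1) (stB.1.getD (effIdx n (m - 1)) 0) < (n : Int) :=
        lt_of_le_of_ne hs2 hne
      have hcons := hs4 hlt
      rw [← hs3, hnz] at hcons
      exact List.cons_ne_nil _ _ hcons.symm
    rw [List.reverse_nil, if_pos rfl, if_pos hr'n]
    refine ⟨hA, by rw [pySetIdx_length]; exact hB, hres, hans, ?_⟩
    intro c' hc'
    rw [pySetIdx_getD _ _ _ _ _ (by rw [hB]; exact hc'), hB]
    by_cases hcc : c' = effIdx n (m - 1)
    · subst hcc
      rw [if_pos rfl]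
      refine ⟨by omega, by omega, ?_⟩
      rw [hcol, hnz, hr'n, nzI_stop board n _ _ (le_refl _)]
    · rw [if_neg hcc]
      exact hcols c' hc'
  · -- nonempty column: both fetch the topmost nonzero doll d
    have hr'lt : scanB board n (m - 1) (stB.1.getD (effIdx n (m - 1)) 0) < (n : Int) := by
      by_contra hge
      have hr'n : scanB board n (m - 1) (stB.1.getD (effIdx n (m - 1)) 0) = (n : Int) := by omega
      have := hs3
      rw [hnz, hr'n, nzI_stop board n _ _ (le_refl _)] at this
      exact List.cons_ne_nil _ _ this
    have hcons := hs4 hr'lt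
    rw [← hs3, hnz] at hcons
    have hd : d = PySem.List.pyGetD
        (PySem.List.pyGetD board (scanB board n (m - 1) (stB.1.getD (effIdx n (m - 1)) 0)) [])
        (m - 1) 0 := (List.cons.injEq _ _ _ _ ▸ hcons).1
    have htail : tail = nzI board n (effIdx n (m - 1))
        (scanB board n (m - 1) (stB.1.getD (effIdx n (m - 1)) 0) + 1) :=
      (List.cons.injEq _ _ _ _ ▸ hcons).2
    rw [List.reverse_cons, if_neg (show ¬(tail.reverse ++ [d] = []) by simp),
        if_neg (show ¬(scanB board n (m - 1) (stB.1.getD (effIdx n (m - 1)) 0) = (n : Int)) by omega),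
        List.dropLast_concat, PySem.List.pyGetD_neg_one_append_singleton, ← hd, hres, hans]
    rw [show (if stB.2.1 ≠ [] ∧ stB.2.1.getLast? = some d then
            (pySetIdx stB.1 (m - 1) (scanB board n (m - 1) (stB.1.getD (effIdx n (m - 1)) 0) + 1),
              stB.2.1.dropLast, stB.2.2 + 2)
          else
            (pySetIdx stB.1 (m - 1) (scanB board n (m - 1) (stB.1.getD (effIdx n (m - 1)) 0) + 1),
              stB.2.1 ++ [d], stB.2.2))
        = (pySetIdx stB.1 (m - 1) (scanB board n (m - 1) (stB.1.getD (effIdx n (m - 1)) 0) + 1),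
           if stB.2.1 ≠ [] ∧ stB.2.1.getLast? = some d then (stB.2.1.dropLast, stB.2.2 + 2)
           else (stB.2.1 ++ [d], stB.2.2))
      from by split_ifs <;> rfl]
    refine ⟨by rw [pySetIdx_length]; exact hA, by rw [pySetIdx_length]; exact hB, rfl, rfl, ?_⟩
    intro c' hc'
    rw [pySetIdx_getD _ _ _ _ _ (by rw [hB]; exact hc'), hB]
    by_cases hcc : c' = effIdx n (m - 1)
    · subst hcc
      rw [if_pos rfl]
      refine ⟨by omega, by omega, ?_⟩
      rw [pySetIdx_getD _ _ _ _ _ (by rw [hA]; exact hclt), hA, if_pos rfl, ← htail]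
    · rw [if_neg hcc]
      obtain ⟨o1, o2, o3⟩ := hcols c' hc'
      refine ⟨o1, o2, ?_⟩
      rw [pySetIdx_getD _ _ _ _ _ (by rw [hA]; exact hc'), hA, if_neg hcc]
      exact o3

lemma fold_inv (board : List (List Int)) (n : Nat) (hn : board.length = n) :
    ∀ (moves : List Int) (stA : List (List Int) × List Int × Int)
      (stB : List Int × List Int × Int),
      InvP board n stA stB →
      (∀ m ∈ moves, -(n : Int) ≤ m - 1 ∧ m - 1 < (n : Int)) →
      ((∀ m ∈ moves, 1 ≤ m) ∨ ∀ row ∈ board, row.length = n) →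
      InvP board n ((moves.map (fun i => i - 1)).foldl stepA stA)
        (moves.foldl (stepB board n) stB) := by
  intro moves
  induction moves with
  | nil => intro stA stB hinv _ _; exact hinv
  | cons m ms ih =>
    intro stA stB hinv hbnd h3
    simp only [List.map_cons, List.foldl_cons]
    exact ih _ _
      (step_inv board n hn m (hbnd m (by simp)).1 (hbnd m (by simp)).2
        (h3.imp (fun h => h m (by simp)) id) stA stB hinv)
      (fun m' hm' => hbnd m' (by simp [hm']))
      (h3.imp (fun h m' hm' => h m' (by simp [hm'])) id)

-- ===== VERDICT (by name: the statement is the Claim_ definition above) =====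
theorem solution_spec : Claim_equal_solution := by
  intro board moves _hdom hpre
  obtain ⟨hrows, hbnd, hsq⟩ := hpre
  unfold Spec_solution solution solution_alt
  have hinit : InvP board board.length
      ((List.range board.length).map (fun (i : Nat) =>
        (PySem.List.pyRange ((board.length : Int) - 1) (-1) (-1)).foldl
          (fun st j =>
            if PySem.List.pyGetD (PySem.List.pyGetD board j []) (i : Int) 0 ≠ 0
            then st ++ [PySem.List.pyGetD (PySem.List.pyGetD board j []) (i : Int) 0]
            else st) []), ([] : List Int), (0 : Int))
      (List.replicate board.length (0 : Int), ([] : List Int), (0 : Int)) := by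
    refine ⟨by simp, by simp, rfl, rfl, ?_⟩
    intro c hc
    have htop : (List.replicate board.length (0 : Int)).getD c 0 = 0 := by
      rw [List.getD_eq_getElem _ _ (by simpa using hc), List.getElem_replicate]
    refine ⟨by rw [htop], by rw [htop]; positivity, ?_⟩
    rw [htop]
    rw [PySem.List.getD_map_range _ _ _ _ hc]
    rw [build_aux board c board.length []]
    rw [List.nil_append]
    congr 1
    have := nzBelow_eq board board.length c board.length (le_refl _)
    rwa [nzI_stop board board.length c (board.length : Int) (le_refl _), List.append_nil] at this
  have hfin := fold_inv board board.length rfl moves _ _ hinit hbnd hsq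
  exact hfin.2.2.2.1
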